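-- pv_equiv track=rewrite | github.com/kacperhalaj/Numerical-Methods | 2-dzielenieWielomianu.py | horner_dzielenie
-- ===== SOURCE A (Python) =====
-- def horner_dzielenie(lista, c):
--     n = len(lista) - 1  # Stopień wielomianu
--     iloraz = [0] * n  # Lista na współczynniki ilorazu, o jeden stopień mniejsza niż wielomian
--     iloraz[0] = lista[0]  # Pierwszy współczynnik ilorazu to najwyższy współczynnik wielomianu
--
--     # Schemat Hornera dla ilorazu
--     for i in range(1, n):
--         iloraz[i] = iloraz[i - 1] * c + lista[i]
--
--     # Reszta: ostatni krok Hornera daje resztę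
--     reszta = iloraz[n - 1] * c + lista[-1]
--
--     return iloraz, reszta
-- ===== SOURCE B (Python) =====
-- def horner_dzielenie(lista, c):
--     # Closed form instead of the Horner recurrence: the i-th quotient
--     # coefficient is sum_{j<=i} lista[j] * c**(i-j), and the remainder is the
--     # polynomial evaluated at c by the same power sum (exact on integers).
--     n = len(lista) - 1
--     iloraz = [sum(a * c ** (i - j) for j, a in enumerate(lista[:i + 1]))
--               for i in range(n)]
--     reszta = sum(a * c ** (n - j) for j, a in enumerate(lista))
--     return iloraz, reszta
-- ===== Notes on version B (the rewrite author's own statement) =====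
-- stated objective: alternative
-- what changed: Replaces the sequential Horner recurrence by a closed form: each quotient coefficient and the remainder are computed independently as the power sum sum_j lista[j]*c**(i-j), exact over integers.
import Mathlib
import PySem

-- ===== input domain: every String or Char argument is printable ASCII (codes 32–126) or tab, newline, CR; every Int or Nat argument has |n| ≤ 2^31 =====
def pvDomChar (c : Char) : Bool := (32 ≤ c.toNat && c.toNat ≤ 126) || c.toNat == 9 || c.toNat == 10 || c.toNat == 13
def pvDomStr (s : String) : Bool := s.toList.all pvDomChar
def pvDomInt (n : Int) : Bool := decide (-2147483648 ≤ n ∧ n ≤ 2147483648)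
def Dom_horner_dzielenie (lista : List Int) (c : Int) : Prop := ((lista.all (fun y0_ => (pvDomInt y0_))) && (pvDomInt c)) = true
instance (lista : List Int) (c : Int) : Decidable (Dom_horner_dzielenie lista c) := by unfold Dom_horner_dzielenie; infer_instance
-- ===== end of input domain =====

-- B replaces the sequential Horner recurrence by independent closed-form power sums
-- (quotient coefficient i = Σ_{j≤i} lista[j]·c^(i-j); exact over integers; O(n²), not faster).

-- ===== PORT A =====
def horner_dzielenie (lista : List Int) (c : Int) : List Int × Int :=
  let n : Int := (lista.length : Int) - 1
  let iloraz0 : List Int := List.replicate n.toNat 0          -- [0] * n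
  let iloraz1 : List Int :=                                   -- iloraz[0] = lista[0]
    PySem.List.pySetD iloraz0 0 (PySem.List.pyGetD lista 0 0)
  let iloraz : List Int :=                                    -- for i in range(1, n): iloraz[i] = iloraz[i-1]*c + lista[i]
    (PySem.List.pyRange 1 n 1).foldl
      (fun il i => PySem.List.pySetD il i (PySem.List.pyGetD il (i - 1) 0 * c + PySem.List.pyGetD lista i 0)) iloraz1
  let reszta : Int := PySem.List.pyGetD iloraz (n - 1) 0 * c + PySem.List.pyGetD lista (-1) 0
  (iloraz, reszta)

-- ===== PORT B =====
-- c ** (i - j): every evaluated term has j ≤ i, so the exponent is nonnegative and `.toNat` is exact.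
def horner_dzielenie_alt (lista : List Int) (c : Int) : List Int × Int :=
  let n : Int := (lista.length : Int) - 1
  let iloraz : List Int :=
    (PySem.List.pyRange 0 n 1).map (fun i =>
      ((PySem.List.enumerate (PySem.List.slice lista none (some (i + 1)))).map
        (fun ja => ja.2 * c ^ (i - ja.1).toNat)).sum)
  let reszta : Int :=
    ((PySem.List.enumerate lista).map (fun ja => ja.2 * c ^ (n - ja.1).toNat)).sum
  (iloraz, reszta)

-- ===== PRECONDITION & SPEC =====
-- A raises IndexError on lists of length < 2 (iloraz[0] on an empty quotient list); Pre_ excludes exactly those.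
def Pre_horner_dzielenie (lista : List Int) (c : Int) : Prop := 2 ≤ lista.length
instance (lista : List Int) (c : Int) : Decidable (Pre_horner_dzielenie lista c) := by unfold Pre_horner_dzielenie; infer_instance
def pvWitness_horner_dzielenie : List Int × Int := ([1, -3, 2], 2)
def Spec_horner_dzielenie (lista : List Int) (c : Int) (out : List Int × Int) : Prop := out = horner_dzielenie_alt lista c
instance (lista : List Int) (c : Int) (out : List Int × Int) : Decidable (Spec_horner_dzielenie lista c out) := by unfold Spec_horner_dzielenie; infer_instance

-- ===== CLAIM (what is proved, stated in full; the proofs are below) =====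
def Claim_equal_horner_dzielenie : Prop := ∀ (lista : List Int) (c : Int), Dom_horner_dzielenie lista c → Pre_horner_dzielenie lista c → Spec_horner_dzielenie lista c (horner_dzielenie lista c)

-- ===== LEMMAS AND PROOFS =====

/-- The Horner scan: the list of successive accumulator values (characterises A's quotient). -/
def pvScan (c acc : Int) : List Int → List Int
  | [] => []
  | a :: t => (acc * c + a) :: pvScan c (acc * c + a) t

theorem pvScan_length (c acc : Int) (p : List Int) : (pvScan c acc p).length = p.length := by
  induction p generalizing acc with
  | nil => rfl
  | cons a t ih => simp [pvScan, ih]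

theorem pvScan_recur (c : Int) (p : List Int) : ∀ (acc : Int) (j : Nat), j + 1 < p.length →
    (pvScan c acc p).getD (j + 1) 0
      = (pvScan c acc p).getD j 0 * c + p.getD (j + 1) 0 := by
  induction p with
  | nil => intro acc j hj; simp at hj
  | cons a t ih =>
      intro acc j hj
      cases j with
      | zero =>
          cases t with
          | nil => simp at hj
          | cons b t' => simp [pvScan]
      | succ j' =>
          simp only [pvScan, List.getD_cons_succ]
          exact ih _ j' (by simpa using Nat.lt_of_succ_lt_succ hj)

/-- Scan values are Horner folds of the prefixes. -/
theorem pvScan_getD_foldl (c : Int) (p : List Int) : ∀ (acc : Int) (k : Nat), k < p.length →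
    (pvScan c acc p).getD k 0 = (p.take (k + 1)).foldl (fun r a => r * c + a) acc := by
  induction p with
  | nil => intro acc k hk; simp at hk
  | cons a t ih =>
      intro acc k hk
      cases k with
      | zero => simp [pvScan]
      | succ k' =>
          simp only [pvScan, List.getD_cons_succ, List.take_succ_cons, List.foldl_cons]
          exact ih _ k' (by simpa using Nat.lt_of_succ_lt_succ hk)

/-- The Horner fold is the closed-form power sum (B's arithmetic). -/
theorem pvFoldl_eq_enumsum (c : Int) : ∀ (p : List Int) (acc s : Int),
    p.foldl (fun r a => r * c + a) acc
      = acc * c ^ p.length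
        + ((PySem.List.enumerate p s).map
            (fun ja => ja.2 * c ^ (s + (p.length : Int) - 1 - ja.1).toNat)).sum := by
  intro p
  induction p with
  | nil => intro acc s; simp [PySem.List.enumerate_nil]
  | cons a t ih =>
      intro acc s
      rw [List.foldl_cons, ih (acc * c + a) (s + 1), PySem.List.enumerate_cons]
      simp only [List.map_cons, List.sum_cons, List.length_cons]
      have h1 : (s + ((t.length : Int) + 1) - 1 - s).toNat = t.length := by omega
      have h2 : ∀ ja : Int × Int,
          (s + 1 + (t.length : Int) - 1 - ja.1).toNat = (s + ((t.length : Int) + 1) - 1 - ja.1).toNat := by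
        intro ja; congr 1; omega
      push_cast
      rw [h1]
      have h3 : ((PySem.List.enumerate t (s + 1)).map
            (fun ja => ja.2 * c ^ (s + 1 + (t.length : Int) - 1 - ja.1).toNat)).sum
          = ((PySem.List.enumerate t (s + 1)).map
            (fun ja => ja.2 * c ^ (s + ((t.length : Int) + 1) - 1 - ja.1).toNat)).sum := by
        congr 1; exact List.map_congr_left (fun ja _ => by rw [h2 ja])
      rw [h3]
      ring

/-- A's loop invariant: after iterations 1..k, iloraz is the first k+1 scan values padded with zeros. -/
theorem pvFoldA (lista : List Int) (c : Int) (m : Nat) (hm : lista.length = m + 1) (hm1 : 1 ≤ m) :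
    ∀ (k : Nat), k < m →
      (PySem.List.pyRange 1 ((k : Int) + 1) 1).foldl
          (fun il i => PySem.List.pySetD il i (PySem.List.pyGetD il (i - 1) 0 * c + PySem.List.pyGetD lista i 0))
          (PySem.List.pySetD (List.replicate m 0) 0 (PySem.List.pyGetD lista 0 0))
        = (pvScan c 0 lista.dropLast).take (k + 1) ++ List.replicate (m - (k + 1)) 0 := by
  have hlenp : lista.dropLast.length = m := by simp [hm]
  have hlenS : (pvScan c 0 lista.dropLast).length = m := by rw [pvScan_length, hlenp]
  -- lista agrees with its dropLast on indices < m
  have hagree : ∀ (j : Nat), j < m → lista.getD j 0 = lista.dropLast.getD j 0 := by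
    intro j hj
    have h1 : j < lista.length := by omega
    have h2 : j < lista.dropLast.length := by omega
    rw [List.getD_eq_getElem _ _ h1, List.getD_eq_getElem _ _ h2]
    simp [List.getElem_dropLast]
  intro k
  induction k with
  | zero =>
      intro hk
      rw [show ((0 : Nat) : Int) + 1 = (1 : Int) by norm_num,
        PySem.List.pyRange_one_eq_nil (le_refl 1)]
      simp only [List.foldl_nil]
      obtain ⟨m', rfl⟩ : ∃ m', m = m' + 1 := ⟨m - 1, by omega⟩
      obtain ⟨p0, pt, hp⟩ : ∃ p0 pt, lista.dropLast = p0 :: pt := by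
        cases hcase : lista.dropLast with
        | nil => rw [hcase] at hlenp; simp at hlenp
        | cons p0 pt => exact ⟨p0, pt, rfl⟩
      have hl0 : lista.getD 0 0 = p0 := by
        have := hagree 0 (by omega); rw [hp] at this; simpa using this
      rw [hp, List.replicate_succ]
      have hl0' : lista[0]?.getD 0 = p0 := hl0
      simp [pysem, PySem.List.pySetD_of_nonneg, pvScan, hl0']
  | succ k' ihk =>
      intro hk
      have hk' : k' < m := by omega
      have hrange : PySem.List.pyRange 1 ((k' : Int) + 1 + 1) 1
          = PySem.List.pyRange 1 ((k' : Int) + 1) 1 ++ [((k' : Int) + 1)] := by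
        exact PySem.List.pyRange_one_succ_right (by omega)
      rw [show ((k' + 1 : Nat) : Int) + 1 = ((k' : Int) + 1) + 1 by push_cast; ring, hrange,
        List.foldl_append, ihk hk']
      set S := pvScan c 0 lista.dropLast with hS
      simp only [List.foldl_cons, List.foldl_nil]
      have hidx : ((k' : Int) + 1) = ((k' + 1 : Nat) : Int) := by omega
      have hsub : ((k' : Int) + 1 - 1) = ((k' : Nat) : Int) := by omega
      -- the read at i-1 = k' lands in the take part and equals S[k']
      have hread : PySem.List.pyGetD (S.take (k' + 1) ++ List.replicate (m - (k' + 1)) 0) ((k' : Int) + 1 - 1) 0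
          = S.getD k' 0 := by
        rw [hsub, PySem.List.pyGetD_natCast]
        rw [List.getD_append _ _ _ _ (by simp [hlenS]; omega)]
        rw [List.getD_eq_getElem _ _ (by simp [hlenS]; omega), List.getElem_take,
          List.getD_eq_getElem _ _ (by omega)]
      -- lista[k'+1] = dropLast[k'+1]
      have hlread : PySem.List.pyGetD lista ((k' : Int) + 1) 0 = lista.dropLast.getD (k' + 1) 0 := by
        rw [hidx, PySem.List.pyGetD_natCast]
        exact hagree (k' + 1) hk
      -- the written value is S[k'+1]
      have hval : S.getD k' 0 * c + lista.dropLast.getD (k' + 1) 0 = S.getD (k' + 1) 0 :=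
        (pvScan_recur c lista.dropLast 0 k' (by omega)).symm
      rw [hread, hlread, hidx, PySem.List.pySetD_natCast, hval]
      -- set at position k'+1 extends the take and shrinks the padding
      have hrep : List.replicate (m - (k' + 1)) (0 : Int) = 0 :: List.replicate (m - (k' + 2)) 0 := by
        rw [show m - (k' + 1) = (m - (k' + 2)) + 1 by omega, List.replicate_succ]
      rw [hrep]
      rw [List.set_append_right _ _ (by simp [hlenS])]
      have hlt : (k' + 1) - (S.take (k' + 1)).length = 0 := by simp [hlenS]; omega
      rw [hlt]
      simp only [List.set_cons_zero]
      have htake : S.take (k' + 1) ++ [S.getD (k' + 1) 0] = S.take (k' + 2) := by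
        have h1 : k' + 1 < S.length := by omega
        rw [List.getD_eq_getElem _ _ h1, ← List.take_concat_get h1, List.concat_eq_append]
      rw [show k' + 1 + 1 = k' + 2 from rfl, ← htake, List.append_assoc, List.singleton_append]

theorem horner_eq (lista : List Int) (c : Int) (h : 2 ≤ lista.length) :
    horner_dzielenie lista c = horner_dzielenie_alt lista c := by
  obtain ⟨m, hm⟩ : ∃ m, lista.length = m + 1 := ⟨lista.length - 1, by omega⟩
  have hm1 : 1 ≤ m := by omega
  have hlenp : lista.dropLast.length = m := by simp [hm]
  set S := pvScan c 0 lista.dropLast with hS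
  have hlenS : S.length = m := by rw [hS, pvScan_length, hlenp]
  have hSne : S ≠ [] := by intro hnil; rw [hnil] at hlenS; simp at hlenS; omega
  have hn : ((lista.length : Int) - 1) = (m : Int) := by omega
  -- A's quotient is the full scan
  have hA : horner_dzielenie lista c
      = (S, PySem.List.pyGetD S ((m : Int) - 1) 0 * c + PySem.List.pyGetD lista (-1) 0) := by
    unfold horner_dzielenie
    simp only [hn, Int.toNat_natCast]
    have hfull := pvFoldA lista c m hm hm1 (m - 1) (by omega)
    rw [show ((m - 1 : Nat) : Int) + 1 = (m : Int) by omega] at hfull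
    rw [show (m - 1 + 1) = m by omega, Nat.sub_self, List.replicate_zero, List.append_nil,
      List.take_of_length_le (le_of_eq (by rw [pvScan_length]; exact hlenp)), ← hS] at hfull
    rw [hfull]
  -- B's quotient entry k is the Horner fold of the prefix take (k+1)
  have hBentry : ∀ k : Nat, k < m →
      ((PySem.List.enumerate (PySem.List.slice lista none (some ((k : Int) + 1)))).map
        (fun ja => ja.2 * c ^ ((k : Int) - ja.1).toNat)).sum
      = (lista.take (k + 1)).foldl (fun r a => r * c + a) 0 := by
    intro k hk
    have hslice : PySem.List.slice lista none (some ((k : Int) + 1)) = lista.take (k + 1) := by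
      rw [show ((k : Int) + 1) = ((k + 1 : Nat) : Int) by push_cast; ring,
        PySem.List.slice_to_natCast]
    have hlen : (lista.take (k + 1)).length = k + 1 := by
      rw [List.length_take]; omega
    rw [hslice, pvFoldl_eq_enumsum c (lista.take (k + 1)) 0 0, hlen]
    have : ∀ ja : Int × Int,
        ((0 : Int) + ((k + 1 : Nat) : Int) - 1 - ja.1).toNat = ((k : Int) - ja.1).toNat := by
      intro ja; congr 1; push_cast; ring
    rw [List.map_congr_left (fun ja _ => by rw [← this ja])]
    ring
  -- prefixes of lista and of its dropLast agree up to m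
  have hpref : ∀ k : Nat, k < m → lista.take (k + 1) = lista.dropLast.take (k + 1) := by
    intro k hk
    rw [List.dropLast_eq_take, List.take_take]
    congr 1
    simp [hm]; omega
  -- the two quotient lists are equal
  have hquot : (PySem.List.pyRange 0 ((lista.length : Int) - 1) 1).map (fun i =>
      ((PySem.List.enumerate (PySem.List.slice lista none (some (i + 1)))).map
        (fun ja => ja.2 * c ^ (i - ja.1).toNat)).sum) = S := by
    rw [hn, PySem.List.pyRange_zero_natCast, List.map_map]
    apply List.ext_getElem
    · simp [hlenS]
    · intro k h1 h2
      simp only [List.getElem_map, List.getElem_range, Function.comp]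
      have hk : k < m := by simpa using h1
      rw [hBentry k hk, hpref k hk, ← pvScan_getD_foldl c lista.dropLast 0 k (by omega),
        ← hS, List.getD_eq_getElem _ _ (by omega)]
  -- the remainders are equal
  have hlast : lista.dropLast ++ [lista.getLast (by intro hnil; rw [hnil] at hm; simp at hm)] = lista :=
    List.dropLast_concat_getLast _
  have hrem : ((PySem.List.enumerate lista).map
        (fun ja => ja.2 * c ^ (((lista.length : Int) - 1) - ja.1).toNat)).sum
      = PySem.List.pyGetD S ((m : Int) - 1) 0 * c + PySem.List.pyGetD lista (-1) 0 := by
    have hfold : lista.foldl (fun r a => r * c + a) 0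
        = ((PySem.List.enumerate lista).map
            (fun ja => ja.2 * c ^ (((lista.length : Int) - 1) - ja.1).toNat)).sum := by
      rw [pvFoldl_eq_enumsum c lista 0 0]
      rw [List.map_congr_left (fun ja _ => by
        rw [show ((0 : Int) + (lista.length : Int) - 1 - ja.1).toNat
            = (((lista.length : Int) - 1) - ja.1).toNat by congr 1; ring])]
      ring
    rw [← hfold]
    conv_lhs => rw [← hlast]
    rw [List.foldl_append, List.foldl_cons, List.foldl_nil]
    have hS1 : PySem.List.pyGetD S ((m : Int) - 1) 0
        = lista.dropLast.foldl (fun r a => r * c + a) 0 := by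
      rw [show ((m : Int) - 1) = ((m - 1 : Nat) : Int) by omega, PySem.List.pyGetD_natCast,
        pvScan_getD_foldl c lista.dropLast 0 (m - 1) (by omega),
        show (m - 1) + 1 = m by omega, ← hlenp, List.take_length]
    have hLget : PySem.List.pyGetD lista (-1) 0
        = lista.getLast (by intro hnil; rw [hnil] at hm; simp at hm) := by
      rw [PySem.List.pyGetD_neg_one lista 0 (by intro hnil; rw [hnil] at hm; simp at hm)]
    rw [hS1, hLget]
  have hBdef : horner_dzielenie_alt lista c
      = ((PySem.List.pyRange 0 ((lista.length : Int) - 1) 1).map (fun i =>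
          ((PySem.List.enumerate (PySem.List.slice lista none (some (i + 1)))).map
            (fun ja => ja.2 * c ^ (i - ja.1).toNat)).sum),
        ((PySem.List.enumerate lista).map
          (fun ja => ja.2 * c ^ (((lista.length : Int) - 1) - ja.1).toNat)).sum) := rfl
  rw [hA, hBdef, hquot, hrem]

-- ===== VERDICT (by name: the statement is the Claim_ definition above) =====
theorem horner_dzielenie_spec : Claim_equal_horner_dzielenie := by
  intro lista c _ hpre
  unfold Spec_horner_dzielenie
  exact horner_eq lista c hpre
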